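-- pv_equiv track=rewrite | github.com/KevinBolanosDev/inteligenciaArtificialG10-PIO | tallerAI/functionPython.py | crear_rombo_asteriscos
-- ===== SOURCE A (Python) =====
-- def crear_rombo_asteriscos(n):
--   matriz = []
--   # Parte superior del rombo
--   for i in range(1, n + 1):
--     fila = [' ' * (n - i) + '*' * (2 * i - 1) + ' ' * (n - i)]
--     matriz.append(fila)
--   # Parte inferior del rombo (sin la fila central repetida)
--   for i in range(n - 1, 0, -1):
--     fila = [' ' * (n - i) + '*' * (2 * i - 1) + ' ' * (n - i)]
--     matriz.append(fila)
--   return matriz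
-- ===== SOURCE B (Python) =====
-- def crear_rombo_asteriscos(n):
--   # Incrementally maintain one mutable row of characters.
--   # Start from the single-star top row; each later row of the top half is the
--   # previous row with one '*' written at each end of the star block; the bottom
--   # half erases them back.  No row is recomputed from a formula.
--   if n <= 0:
--     return []
--   rombo = []
--   fila = [' '] * (2 * n - 1)
--   fila[n - 1] = '*'
--   rombo.append([''.join(fila)])
--   for i in range(1, n):
--     fila[n - 1 - i] = '*'
--     fila[n - 1 + i] = '*'
--     rombo.append([''.join(fila)])
--   for i in range(n - 1, 0, -1):
--     fila[n - 1 - i] = ' '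
--     fila[n - 1 + i] = ' '
--     rombo.append([''.join(fila)])
--   return rombo
-- ===== Notes on version B (the rewrite author's own statement) =====
-- stated objective: alternative
-- what changed: B never recomputes a row from the width formula: it keeps one mutable character array, derives each row from the previous one by writing (top half) or erasing (bottom half) a single '*' at each end of the star block, and snapshots the array after each update.
import Mathlib
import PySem

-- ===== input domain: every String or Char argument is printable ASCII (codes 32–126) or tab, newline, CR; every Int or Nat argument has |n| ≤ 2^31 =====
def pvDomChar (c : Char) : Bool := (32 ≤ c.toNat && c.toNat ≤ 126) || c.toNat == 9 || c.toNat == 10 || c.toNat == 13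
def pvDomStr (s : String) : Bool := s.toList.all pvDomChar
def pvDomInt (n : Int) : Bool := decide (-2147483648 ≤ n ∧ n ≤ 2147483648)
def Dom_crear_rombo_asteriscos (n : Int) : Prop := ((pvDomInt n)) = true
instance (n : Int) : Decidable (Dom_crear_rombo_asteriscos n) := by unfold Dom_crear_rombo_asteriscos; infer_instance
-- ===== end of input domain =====

-- B builds each row from the previous one by two in-place character writes on a
-- single mutable row (no per-row width formula); alternative decomposition, same cost.

-- ===== PORT A =====
-- ' ' * (n - i): Python string repetition clamps a negative count to empty, as Int.toNat does.
def crear_rombo_asteriscos (n : Int) : List (List String) :=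
  let matriz := (PySem.List.pyRange 1 (n + 1) 1).foldl (fun acc i =>
    acc ++ [[String.ofList (List.replicate (n - i).toNat ' '
      ++ List.replicate (2 * i - 1).toNat '*' ++ List.replicate (n - i).toNat ' ')]]) []
  (PySem.List.pyRange (n - 1) 0 (-1)).foldl (fun acc i =>
    acc ++ [[String.ofList (List.replicate (n - i).toNat ' '
      ++ List.replicate (2 * i - 1).toNat '*' ++ List.replicate (n - i).toNat ' ')]]) matriz

-- ===== PORT B =====
-- fila[k] = c on an in-range nonnegative index is List.set k c; ''.join(fila) is String.ofList.
def crear_rombo_asteriscos_alt (n : Int) : List (List String) :=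
  if n ≤ 0 then []
  else
    let fila0 := (List.replicate (2 * n - 1).toNat ' ').set (n - 1).toNat '*'
    let st1 := (PySem.List.pyRange 1 n 1).foldl
      (fun (st : List (List String) × List Char) i =>
        let f := (st.2.set (n - 1 - i).toNat '*').set (n - 1 + i).toNat '*'
        (st.1 ++ [[String.ofList f]], f))
      ([[String.ofList fila0]], fila0)
    ((PySem.List.pyRange (n - 1) 0 (-1)).foldl
      (fun (st : List (List String) × List Char) i =>
        let f := (st.2.set (n - 1 - i).toNat ' ').set (n - 1 + i).toNat ' '
        (st.1 ++ [[String.ofList f]], f))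
      st1).1

-- ===== PRECONDITION & SPEC =====
def Spec_crear_rombo_asteriscos (n : Int) (out : List (List String)) : Prop := out = crear_rombo_asteriscos_alt n
instance (n : Int) (out : List (List String)) : Decidable (Spec_crear_rombo_asteriscos n out) := by unfold Spec_crear_rombo_asteriscos; infer_instance

-- ===== CLAIM (what is proved, stated in full; the proofs are below) =====
def Claim_equal_crear_rombo_asteriscos : Prop := ∀ (n : Int), Dom_crear_rombo_asteriscos n → Spec_crear_rombo_asteriscos n (crear_rombo_asteriscos n)

-- ===== LEMMAS AND PROOFS =====

-- row i of the rhombus, as characters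
def pvChars (n i : Int) : List Char :=
  List.replicate (n - i).toNat ' ' ++ List.replicate (2 * i - 1).toNat '*'
    ++ List.replicate (n - i).toNat ' '

theorem pvSetWiden (m k : ℕ) (hm : 1 ≤ m) :
    ((List.replicate m ' ' ++ List.replicate k '*' ++ List.replicate m ' ').set (m - 1) '*').set
        (m + k) '*'
      = List.replicate (m - 1) ' ' ++ List.replicate (k + 2) '*' ++ List.replicate (m - 1) ' ' := by
  apply List.ext_getElem
  · simp; omega
  · intro idx h1 h2
    simp only [List.getElem_set, List.getElem_append, List.length_append,
      List.length_replicate, List.getElem_replicate]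
    split_ifs <;> first | rfl | omega

theorem pvSetShrink (m k : ℕ) (hm : 1 ≤ m) :
    ((List.replicate (m - 1) ' ' ++ List.replicate (k + 2) '*' ++ List.replicate (m - 1) ' ').set
        (m - 1) ' ').set (m + k) ' '
      = List.replicate m ' ' ++ List.replicate k '*' ++ List.replicate m ' ' := by
  apply List.ext_getElem
  · simp; omega
  · intro idx h1 h2
    simp only [List.getElem_set, List.getElem_append, List.length_append,
      List.length_replicate, List.getElem_replicate]
    split_ifs <;> first | rfl | omega

theorem pvSetMid (m : ℕ) :
    (List.replicate (2 * m + 1) ' ').set m '*'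
      = List.replicate m ' ' ++ List.replicate 1 '*' ++ List.replicate m ' ' := by
  apply List.ext_getElem
  · simp; omega
  · intro idx h1 h2
    simp only [List.getElem_set, List.getElem_append, List.length_append,
      List.length_replicate, List.getElem_replicate]
    split_ifs <;> first | rfl | omega

theorem pvCharsUp (n i : Int) (h1 : 1 ≤ i) (h2 : i ≤ n - 1) :
    ((pvChars n i).set (n - 1 - i).toNat '*').set (n - 1 + i).toNat '*' = pvChars n (i + 1) := by
  have hm : (n - i).toNat = (n - i).toNat := rfl
  have e1 : (n - 1 - i).toNat = (n - i).toNat - 1 := by omega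
  have e2 : (n - 1 + i).toNat = (n - i).toNat + (2 * i - 1).toNat := by omega
  have e3 : (n - (i + 1)).toNat = (n - i).toNat - 1 := by omega
  have e4 : (2 * (i + 1) - 1).toNat = (2 * i - 1).toNat + 2 := by omega
  unfold pvChars
  rw [e1, e2, e3, e4, pvSetWiden _ _ (by omega)]

theorem pvCharsDn (n i : Int) (h1 : 1 ≤ i) (h2 : i ≤ n - 1) :
    ((pvChars n (i + 1)).set (n - 1 - i).toNat ' ').set (n - 1 + i).toNat ' ' = pvChars n i := by
  have e1 : (n - 1 - i).toNat = (n - i).toNat - 1 := by omega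
  have e2 : (n - 1 + i).toNat = (n - i).toNat + (2 * i - 1).toNat := by omega
  have e3 : (n - (i + 1)).toNat = (n - i).toNat - 1 := by omega
  have e4 : (2 * (i + 1) - 1).toNat = (2 * i - 1).toNat + 2 := by omega
  unfold pvChars
  rw [e1, e2, e3, e4, pvSetShrink _ _ (by omega)]

theorem pvFila0 (n : Int) (hn : 1 ≤ n) :
    (List.replicate (2 * n - 1).toNat ' ').set (n - 1).toNat '*' = pvChars n 1 := by
  have e1 : (2 * n - 1).toNat = 2 * (n - 1).toNat + 1 := by omega
  have e2 : (n - 1).toNat = (n - 1).toNat := rfl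
  unfold pvChars
  rw [e1, pvSetMid]
  norm_num

-- invariant of B's first loop
theorem pvUpLoop (n : Int) (j : ℕ) (hj : (j : Int) ≤ n - 1) :
    (PySem.List.pyRange 1 ((j : Int) + 1) 1).foldl
        (fun (st : List (List String) × List Char) i =>
          let f := (st.2.set (n - 1 - i).toNat '*').set (n - 1 + i).toNat '*'
          (st.1 ++ [[String.ofList f]], f))
        ([[String.ofList (pvChars n 1)]], pvChars n 1)
      = ((PySem.List.pyRange 1 ((j : Int) + 2) 1).map (fun i => [String.ofList (pvChars n i)]),
         pvChars n ((j : Int) + 1)) := by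
  induction j with
  | zero =>
      rw [PySem.List.pyRange_one_eq_nil (by omega)]
      rw [show ((0 : ℕ) : Int) + 2 = 1 + 1 by norm_num, PySem.List.pyRange_one_singleton]
      simp
  | succ j ih =>
      push_cast at hj ⊢
      have hj' : (j : Int) ≤ n - 1 := by omega
      have h1 : PySem.List.pyRange 1 ((j : Int) + 1 + 1) 1
          = PySem.List.pyRange 1 ((j : Int) + 1) 1 ++ [(j : Int) + 1] :=
        PySem.List.pyRange_one_succ_right (by omega)
      have h2 : PySem.List.pyRange 1 ((j : Int) + 2 + 1) 1
          = PySem.List.pyRange 1 ((j : Int) + 2) 1 ++ [(j : Int) + 2] :=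
        PySem.List.pyRange_one_succ_right (by omega)
      have e : (j : Int) + 1 + 2 = (j : Int) + 2 + 1 := by ring
      rw [h1, List.foldl_append, ih hj']
      simp only [List.foldl_cons, List.foldl_nil]
      have hup := pvCharsUp n ((j : Int) + 1) (by omega) (by omega)
      rw [e, h2]
      simp only [hup, List.map_append, List.map_cons, List.map_nil]
      have e2 : (j : Int) + 1 + 1 = (j : Int) + 2 := by ring
      rw [e2]

-- invariant of B's second loop
theorem pvDnLoop (n : Int) (i : ℕ) (hi : (i : Int) ≤ n - 1) (acc : List (List String)) :
    (PySem.List.pyRange (i : Int) 0 (-1)).foldl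
        (fun (st : List (List String) × List Char) t =>
          let f := (st.2.set (n - 1 - t).toNat ' ').set (n - 1 + t).toNat ' '
          (st.1 ++ [[String.ofList f]], f))
        (acc, pvChars n ((i : Int) + 1))
      = (acc ++ (PySem.List.pyRange (i : Int) 0 (-1)).map (fun t => [String.ofList (pvChars n t)]),
         pvChars n 1) := by
  induction i generalizing acc with
  | zero =>
      rw [PySem.List.pyRange_neg_one_eq_nil (by omega)]
      simp
  | succ i ih =>
      push_cast at hi ⊢
      have hi' : (i : Int) ≤ n - 1 := by omega
      have hcons : PySem.List.pyRange ((i : Int) + 1) 0 (-1)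
          = ((i : Int) + 1) :: PySem.List.pyRange ((i : Int) + 1 - 1) 0 (-1) :=
        PySem.List.pyRange_neg_one_cons (by omega)
      have e : (i : Int) + 1 - 1 = (i : Int) := by ring
      rw [hcons, e]
      simp only [List.foldl_cons, List.map_cons]
      have hdn := pvCharsDn n ((i : Int) + 1) (by omega) (by omega)
      simp only [hdn]
      rw [ih hi']
      simp [List.append_assoc]

theorem crear_rombo_eq (n : Int) :
    crear_rombo_asteriscos n = crear_rombo_asteriscos_alt n := by
  unfold crear_rombo_asteriscos crear_rombo_asteriscos_alt
  by_cases hn : n ≤ 0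
  · rw [if_pos hn, PySem.List.pyRange_one_eq_nil (by omega),
      PySem.List.pyRange_neg_one_eq_nil (by omega)]
    simp
  · rw [if_neg hn]
    have hn1 : 1 ≤ n := by omega
    have hj : (((n - 1).toNat : Int)) = n - 1 := by omega
    have e1 : n - 1 + 1 = n := by ring
    have e2 : n - 1 + 2 = n + 1 := by ring
    have hup := pvUpLoop n (n - 1).toNat (by omega)
    rw [hj, e1, e2] at hup
    have hdn := pvDnLoop n (n - 1).toNat (by omega)
      ((PySem.List.pyRange 1 (n + 1) 1).map (fun i => [String.ofList (pvChars n i)]))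
    rw [hj, e1] at hdn
    simp only [pvFila0 n hn1, hup, hdn]
    simp only [PySem.List.foldl_append_singleton_eq_map, List.nil_append, pvChars]

-- ===== VERDICT (by name: the statement is the Claim_ definition above) =====
theorem crear_rombo_asteriscos_spec : Claim_equal_crear_rombo_asteriscos := by
  intro n _
  unfold Spec_crear_rombo_asteriscos
  exact crear_rombo_eq n
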